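-- pv_equiv track=rewrite | github.com/helenypan/hackerrank | minion_game_3.py | calculate_char
-- ===== SOURCE A (Python) =====
-- def calculate_char(string):
--     vow_count, con_count = 0,0
--     counter_vow = 0
--     counter_con = 0
--     for idx in range(len(string)):
--         if string[idx] in ("A", "E", "I", "O", "U"):
--             counter_vow += 1
--         else:
--             counter_con += 1
--         vow_count += counter_vow
--         con_count += counter_con
--     return vow_count,con_count
-- ===== SOURCE B (Python) =====
-- def calculate_char(string):
--     n = len(string)
--     vow_count, con_count = 0, 0
--     for i, ch in enumerate(string):
--         weight = n - i
--         if ch in ("A", "E", "I", "O", "U"):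
--             vow_count += weight
--         else:
--             con_count += weight
--     return vow_count, con_count
-- ===== Notes on version B (the rewrite author's own statement) =====
-- stated objective: simpler
-- what changed: B drops A's running prefix counters (counter_vow/counter_con summed each step) and adds each character's total contribution n-i directly in one pass with only the two result accumulators.
import Mathlib
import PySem

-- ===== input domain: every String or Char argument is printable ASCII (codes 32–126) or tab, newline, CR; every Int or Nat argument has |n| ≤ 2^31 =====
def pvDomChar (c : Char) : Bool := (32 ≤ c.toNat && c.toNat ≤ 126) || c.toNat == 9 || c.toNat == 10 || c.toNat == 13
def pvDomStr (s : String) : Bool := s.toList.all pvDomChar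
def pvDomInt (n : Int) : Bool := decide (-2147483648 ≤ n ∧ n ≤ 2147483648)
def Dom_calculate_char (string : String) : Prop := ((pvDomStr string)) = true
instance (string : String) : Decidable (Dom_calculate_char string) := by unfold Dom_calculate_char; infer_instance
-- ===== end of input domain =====

-- B replaces A's running prefix counters (summed every step) by adding each
-- character's total contribution n-i directly; objective: simpler.


-- ===== PORT A =====
-- A's loop: running prefix counters counter_vow/counter_con, both partial sums
-- vow_count/con_count increased by the current counters at every step.
def aLoop : List Char → Int → Int → Int → Int → Int × Int
  | [], vow_count, con_count, _, _ => (vow_count, con_count)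
  | ch :: rest, vow_count, con_count, counter_vow, counter_con =>
      if ['A', 'E', 'I', 'O', 'U'].contains ch then
        aLoop rest (vow_count + (counter_vow + 1)) (con_count + counter_con) (counter_vow + 1) counter_con
      else
        aLoop rest (vow_count + counter_vow) (con_count + (counter_con + 1)) counter_vow (counter_con + 1)

def calculate_char (string : String) : Int × Int :=
  aLoop string.toList 0 0 0 0

-- ===== PORT B =====
def isVowelB (ch : Char) : Bool := ch = 'A' || ch = 'E' || ch = 'I' || ch = 'O' || ch = 'U'

def bLoop (n : Int) : List (Int × Char) → Int → Int → Int × Int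
  | [], vow_count, con_count => (vow_count, con_count)
  | (i, ch) :: rest, vow_count, con_count =>
      let weight := n - i
      if isVowelB ch then bLoop n rest (vow_count + weight) con_count
      else bLoop n rest vow_count (con_count + weight)

def calculate_char_alt (string : String) : Int × Int :=
  bLoop (string.toList.length : Int) (PySem.List.enumerate string.toList) 0 0

-- ===== PRECONDITION & SPEC =====
def Spec_calculate_char (string : String) (out : Int × Int) : Prop := out = calculate_char_alt string
instance (string : String) (out : Int × Int) : Decidable (Spec_calculate_char string out) := by unfold Spec_calculate_char; infer_instance

-- ===== CLAIM (what is proved, stated in full; the proofs are below) =====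
def Claim_equal_calculate_char : Prop := ∀ (string : String), Dom_calculate_char string → Spec_calculate_char string (calculate_char string)

-- ===== LEMMAS AND PROOFS =====

-- weighted vowel/consonant sums: the character at depth k of l counts (l.length - k) times
def Wv : List Char → Int
  | [] => 0
  | ch :: rest => (if isVowelB ch then (rest.length + 1 : Int) else 0) + Wv rest

def Wc : List Char → Int
  | [] => 0
  | ch :: rest => (if isVowelB ch then 0 else (rest.length + 1 : Int)) + Wc rest

theorem mem_iff_isVowelB (ch : Char) :
    (['A', 'E', 'I', 'O', 'U'].contains ch) = isVowelB ch := by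
  simp only [isVowelB, List.contains_cons, List.contains_nil, Bool.or_false, Bool.or_assoc]
  simp [Bool.beq_eq_decide_eq]

theorem aLoop_eq (l : List Char) : ∀ (v c cv cc : Int),
    aLoop l v c cv cc = (v + cv * l.length + Wv l, c + cc * l.length + Wc l) := by
  induction l with
  | nil => intro v c cv cc; simp [aLoop, Wv, Wc]
  | cons ch rest ih =>
      intro v c cv cc
      simp only [aLoop, mem_iff_isVowelB, Wv, Wc]
      by_cases h : isVowelB ch = true <;> simp [h, ih] <;> constructor <;> ring

theorem bLoop_eq (l : List Char) : ∀ (n i v c : Int), (i = n - l.length) →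
    bLoop n (PySem.List.enumerate l i) v c = (v + Wv l, c + Wc l) := by
  induction l with
  | nil => intro n i v c _; simp [PySem.List.enumerate_nil, bLoop, Wv, Wc]
  | cons ch rest ih =>
      intro n i v c hi
      rw [PySem.List.enumerate_cons]
      simp only [bLoop, Wv, Wc]
      rw [List.length_cons] at hi; push_cast at hi
      have hrest : i + 1 = n - (rest.length : Int) := by omega
      have hw : n - i = (rest.length : Int) + 1 := by omega
      by_cases h : isVowelB ch = true <;>
        simp [h, ih _ _ _ _ hrest, hw] <;> ring

-- ===== VERDICT (by name: the statement is the Claim_ definition above) =====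
theorem calculate_char_spec : Claim_equal_calculate_char := by
  intro s _
  unfold Spec_calculate_char calculate_char calculate_char_alt
  rw [aLoop_eq, bLoop_eq s.toList _ 0 0 0 (by simp)]
  simp
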